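-- pv_equiv track=rewrite | github.com/andrewromanenco/pyjvm | pyjvm/utils/javap.py | read_next_token
-- ===== SOURCE A (Python) =====
-- def read_next_token(signature):
--     index = 0
--     while signature[index] == '[':
--         index += 1
--     if signature[index] == 'L':
--         return signature[:signature.index(';') + 1]
--     else:
--         return signature[:index + 1]
-- ===== SOURCE B (Python) =====
-- def read_next_token(signature):
--     if signature[0] == '[':
--         return '[' + read_next_token(signature[1:])
--     if signature[0] == 'L':
--         return signature[:signature.index(';') + 1]
--     return signature[0]
-- ===== Notes on version B (the rewrite author's own statement) =====
-- stated objective: simpler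
-- what changed: Replaced the index-counter while loop by a recursive descent over the nested JVM array structure: each leading '[' is consumed by recursion on the tail instead of advancing an index into the same string.
import Mathlib
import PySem

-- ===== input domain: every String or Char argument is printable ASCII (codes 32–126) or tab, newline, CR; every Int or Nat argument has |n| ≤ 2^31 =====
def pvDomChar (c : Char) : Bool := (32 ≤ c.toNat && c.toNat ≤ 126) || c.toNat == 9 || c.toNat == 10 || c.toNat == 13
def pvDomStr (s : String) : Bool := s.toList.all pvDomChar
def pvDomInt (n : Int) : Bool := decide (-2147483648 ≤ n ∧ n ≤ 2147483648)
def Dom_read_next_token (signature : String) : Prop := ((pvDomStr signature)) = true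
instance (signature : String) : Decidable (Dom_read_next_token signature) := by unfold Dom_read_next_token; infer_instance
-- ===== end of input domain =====

-- B replaces A's index-counting while loop by recursion over the nested array structure (objective: simpler).

-- ===== PORT A =====
-- the 'while signature[index] == '[': index += 1' loop; if the index runs past the
-- end it stops and returns it (Python raises IndexError there; Pre_ excludes that)
def rntLoop (l : List Char) (index : Nat) : Nat :=
  if h : index < l.length then
    if l[index] = '[' then rntLoop l (index + 1) else index
  else index
termination_by l.length - index

-- A's body on the code points (the convention PYSEM recommends for string ports)
def rntA (l : List Char) : List Char :=
  let index := rntLoop l 0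
  match PySem.List.pyGet? l (index : Int) with
  | some c =>
    if c = 'L' then
      match PySem.List.index? l ';' with
      | some j => PySem.List.slice l none (some ((j : Int) + 1))  -- signature[:signature.index(';')+1]
      | none => []            -- ValueError in Python; excluded by Pre_
    else PySem.List.slice l none (some ((index : Int) + 1))       -- signature[:index+1]
  | none => []                -- IndexError in Python; excluded by Pre_

def read_next_token (signature : String) : String :=
  String.mk (rntA signature.toList)

-- ===== PORT B =====
def rntAlt : List Char → List Char
  | [] => []                  -- IndexError in Python; excluded by Pre_
  | c :: rest =>
    if c = '[' then '[' :: rntAlt rest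
    else if c = 'L' then
      match PySem.List.index? (c :: rest) ';' with
      | some j => PySem.List.slice (c :: rest) none (some ((j : Int) + 1))   -- signature[:signature.index(';')+1]
      | none => []            -- ValueError in Python; excluded by Pre_
    else [c]

def read_next_token_alt (signature : String) : String :=
  String.mk (rntAlt signature.toList)

-- ===== PRECONDITION & SPEC =====
-- Pre_ excludes exactly the inputs where A raises: strings that are empty or all '['
-- (IndexError), and strings whose first non-'[' char is 'L' with no ';' (ValueError);
-- B raises the same exceptions there.
def Pre_read_next_token (signature : String) : Prop :=
  (signature.toList.takeWhile (· = '[')).length < signature.toList.length ∧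
  (signature.toList.getD (signature.toList.takeWhile (· = '[')).length ' ' = 'L' → ';' ∈ signature.toList)
instance (signature : String) : Decidable (Pre_read_next_token signature) := by
  unfold Pre_read_next_token; infer_instance

def pvWitness_read_next_token : String := "[[Ljava/lang/Object;"

def Spec_read_next_token (signature : String) (out : String) : Prop := out = read_next_token_alt signature
instance (signature : String) (out : String) : Decidable (Spec_read_next_token signature out) := by unfold Spec_read_next_token; infer_instance

-- ===== CLAIM (what is proved, stated in full; the proofs are below) =====
def Claim_equal_read_next_token : Prop := ∀ (signature : String), Dom_read_next_token signature → Pre_read_next_token signature → Spec_read_next_token signature (read_next_token signature)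

-- ===== LEMMAS AND PROOFS =====

lemma rntLoop_ge_len (l : List Char) (i : Nat) (h : ¬ i < l.length) : rntLoop l i = i := by
  unfold rntLoop; simp [h]

lemma rntLoop_shift (c : Char) (l : List Char) (i : Nat) :
    rntLoop (c :: l) (i + 1) = rntLoop l i + 1 := by
  by_cases h : i < l.length
  · have h' : i + 1 < (c :: l).length := by simp; omega
    conv_lhs => rw [rntLoop]
    conv_rhs => rw [rntLoop]
    simp only [h', h, dif_pos, List.getElem_cons_succ]
    by_cases hb : l[i] = '['
    · simp only [hb, if_pos]
      exact rntLoop_shift c l (i + 1)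
    · simp [hb]
  · have h' : ¬ i + 1 < (c :: l).length := by simp; omega
    rw [rntLoop_ge_len _ _ h', rntLoop_ge_len _ _ h]
termination_by l.length - i

lemma rntLoop_eq_takeWhile (l : List Char)
    (h : (l.takeWhile (· = '[')).length < l.length) :
    rntLoop l 0 = (l.takeWhile (· = '[')).length := by
  induction l with
  | nil => simp at h
  | cons c rest ih =>
    by_cases hc : c = '['
    · subst hc
      have htw : (('[' :: rest).takeWhile (· = '[')).length
          = (rest.takeWhile (· = '[')).length + 1 := by simp [List.takeWhile]
      have h' : (rest.takeWhile (· = '[')).length < rest.length := by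
        rw [htw] at h; simpa using h
      rw [htw]
      rw [show rntLoop ('[' :: rest) 0 = rntLoop rest 0 + 1 by
        rw [rntLoop]
        simp only [List.length_cons, Nat.zero_lt_succ, dif_pos, List.getElem_cons_zero,
          if_pos rfl]
        exact rntLoop_shift '[' rest 0]
      rw [ih h']
    · rw [rntLoop]
      simp [hc, List.takeWhile, hc]

lemma main_lemma (l : List Char)
    (h1 : (l.takeWhile (· = '[')).length < l.length)
    (h2 : l.getD (l.takeWhile (· = '[')).length ' ' = 'L' → ';' ∈ l) :
    rntA l = rntAlt l := by
  induction l with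
  | nil => simp at h1
  | cons c rest ih =>
    by_cases hc : c = '['
    · subst hc
      have htw : (('[' :: rest).takeWhile (· = '[')).length
          = (rest.takeWhile (· = '[')).length + 1 := by simp [List.takeWhile]
      have h1' : (rest.takeWhile (· = '[')).length < rest.length := by
        rw [htw] at h1; simpa using h1
      have h2' : rest.getD (rest.takeWhile (· = '[')).length ' ' = 'L' → ';' ∈ rest := by
        intro hget
        have hcons : ('[' :: rest).getD (('[' :: rest).takeWhile (· = '[')).length ' ' = 'L' := by
          rw [htw]; simpa [List.getD] using hget
        have hm := h2 hcons
        exact (List.mem_cons.mp hm).resolve_left (by decide)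
      have ihv := ih h1' h2'
      have hl0 : rntLoop ('[' :: rest) 0 = rntLoop rest 0 + 1 := by
        rw [rntLoop]
        simp only [List.length_cons, Nat.zero_lt_succ, dif_pos, List.getElem_cons_zero,
          if_pos rfl]
        exact rntLoop_shift '[' rest 0
      have hk := rntLoop_eq_takeWhile rest h1'
      have hklt : rntLoop rest 0 < rest.length := by omega
      have hpg : PySem.List.pyGet? rest ((rntLoop rest 0 : Nat) : Int)
          = some rest[rntLoop rest 0] := by
        rw [PySem.List.pyGet?_natCast]; simp [List.getElem?_eq_getElem hklt]
      have hgetcons : PySem.List.pyGet? ('[' :: rest) ((rntLoop ('[' :: rest) 0 : Nat) : Int)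
          = some rest[rntLoop rest 0] := by
        rw [hl0]; push_cast
        rw [PySem.List.pyGet?_cons_succ]; exact hpg
      unfold rntA at ihv ⊢
      simp only at ihv ⊢
      rw [hgetcons]
      rw [hpg] at ihv
      rw [show rntAlt ('[' :: rest) = '[' :: rntAlt rest by rw [rntAlt]; simp]
      by_cases hL : rest[rntLoop rest 0] = 'L'
      · simp only [hL, if_pos rfl] at ihv ⊢
        have hsemi : ';' ∈ rest := by
          apply h2'
          rw [← hk, List.getD_eq_getElem?_getD, List.getElem?_eq_getElem hklt]
          simpa using hL
        rcases hj : PySem.List.index? rest ';' with _ | j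
        · rw [PySem.List.index?_eq_none_iff] at hj; exact absurd hsemi hj
        · have hjc : PySem.List.index? ('[' :: rest) ';' = (PySem.List.index? rest ';').map (· + 1) :=
            PySem.List.index?_cons_of_ne rest (by decide)
          rw [hjc, hj]
          rw [hj] at ihv
          simp only [Option.map_some] at *
          simp only [if_true] at ihv ⊢
          have e1 : PySem.List.slice ('[' :: rest) none (some (((j + 1 : Nat) : Int) + 1))
              = '[' :: PySem.List.slice rest none (some ((j : Int) + 1)) := by
            rw [show (((j + 1 : Nat) : Int) + 1) = (((j + 2 : Nat) : Int)) by push_cast; ring,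
                show ((j : Int) + 1) = (((j + 1 : Nat) : Int)) by push_cast; ring]
            rw [PySem.List.slice_to_natCast, PySem.List.slice_to_natCast]
            simp [List.take_succ_cons]
          rw [e1, ihv]
      · simp only [hL, if_neg, ite_false] at ihv ⊢
        rw [hl0]
        have e1 : PySem.List.slice ('[' :: rest) none (some (((rntLoop rest 0 + 1 : Nat) : Int) + 1))
            = '[' :: PySem.List.slice rest none (some (((rntLoop rest 0 : Nat) : Int) + 1)) := by
          rw [show (((rntLoop rest 0 + 1 : Nat) : Int) + 1) = (((rntLoop rest 0 + 2 : Nat) : Int)) by push_cast; ring,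
              show (((rntLoop rest 0 : Nat) : Int) + 1) = (((rntLoop rest 0 + 1 : Nat) : Int)) by push_cast; ring]
          rw [PySem.List.slice_to_natCast, PySem.List.slice_to_natCast]
          simp [List.take_succ_cons]
        rw [e1, ihv]
    · -- first char is not '[': the loop stops at index 0
      have hl0 : rntLoop (c :: rest) 0 = 0 := by
        rw [rntLoop]; simp [hc]
      unfold rntA
      simp only [hl0, Nat.cast_zero]
      rw [show PySem.List.pyGet? (c :: rest) 0 = some c from PySem.List.pyGet?_zero_cons c rest]
      have htw0 : ((c :: rest).takeWhile (· = '[')).length = 0 := by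
        simp [List.takeWhile, hc]
      by_cases hL : c = 'L'
      · subst hL
        simp only [if_pos rfl]
        have hsemi : ';' ∈ ('L' :: rest) := by
          apply h2; rw [htw0]; simp [List.getD]
        rw [show rntAlt ('L' :: rest)
            = (match PySem.List.index? ('L' :: rest) ';' with
               | some j => PySem.List.slice ('L' :: rest) none (some ((j : Int) + 1))
               | none => []) by rw [rntAlt]; rfl]
        rcases hj : PySem.List.index? ('L' :: rest) ';' with _ | j
        · rw [PySem.List.index?_eq_none_iff] at hj; exact absurd hsemi hj
        · rfl
      · simp only [if_neg hL]
        rw [show rntAlt (c :: rest) = [c] by rw [rntAlt]; simp [hc, hL]]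
        rw [show ((0 : Int) + 1) = (((1 : Nat) : Int)) by norm_num]
        rw [PySem.List.slice_to_natCast]
        simp

-- ===== VERDICT (by name: the statement is the Claim_ definition above) =====
theorem read_next_token_spec : Claim_equal_read_next_token := by
  intro s _ hpre
  unfold Spec_read_next_token read_next_token read_next_token_alt
  rw [main_lemma s.toList hpre.1 hpre.2]
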